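-- pv_equiv track=rewrite | github.com/Cinderlia/LLM_taint_on_trace | branch_selector/trace/trace_extract.py | _path_is_filtered
-- ===== SOURCE A (Python) =====
-- def _path_is_filtered(path: str | None) -> bool:
--     if not path:
--         return False
--     s = str(path).replace("\\", "/").lower()
--     needles = (
--         "/vendor/",
--         "/composer/",
--         "/node_modules/",
--         "/tests/",
--         "/test/",
--         "/docs/",
--         "/doc/",
--         "/examples/",
--         "/example/",
--         "/demo/",
--         "/demos/",
--         "/samples/",
--         "/sample/",
--         "/benchmark/",
--         "/benchmarks/",
--         "/build/",
--         "/dist/",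
--         "/coverage/",
--         "/tmp/",
--         "/cache/",
--         "/logs/",
--         "/log/",
--         "/storage/",
--     )
--     return any(n in s for n in needles)
-- ===== SOURCE B (Python) =====
-- _FILTERED = frozenset({
--     "vendor", "composer", "node_modules", "tests", "test", "docs", "doc",
--     "examples", "example", "demo", "demos", "samples", "sample",
--     "benchmark", "benchmarks", "build", "dist", "coverage", "tmp",
--     "cache", "logs", "log", "storage",
-- })
--
--
-- def _path_is_filtered(path: str | None) -> bool:
--     # Single pass: walk the normalized path once, testing each component
--     # that is bounded by slashes on both sides against a name set.
--     if not path: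
--         return False
--     s = str(path).replace("\\", "/").lower()
--     cur = ""
--     inside = False
--     for c in s:
--         if c == "/":
--             if inside and cur in _FILTERED:
--                 return True
--             cur = ""
--             inside = True
--         else:
--             cur += c
--     return False
-- ===== Notes on version B (the rewrite author's own statement) =====
-- stated objective: alternative
-- what changed: A runs 23 separate substring searches ('/name/' in s); B makes a single pass over the normalized path with a component accumulator, testing each slash-bounded interior component against a frozenset of directory names.
import Mathlib
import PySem

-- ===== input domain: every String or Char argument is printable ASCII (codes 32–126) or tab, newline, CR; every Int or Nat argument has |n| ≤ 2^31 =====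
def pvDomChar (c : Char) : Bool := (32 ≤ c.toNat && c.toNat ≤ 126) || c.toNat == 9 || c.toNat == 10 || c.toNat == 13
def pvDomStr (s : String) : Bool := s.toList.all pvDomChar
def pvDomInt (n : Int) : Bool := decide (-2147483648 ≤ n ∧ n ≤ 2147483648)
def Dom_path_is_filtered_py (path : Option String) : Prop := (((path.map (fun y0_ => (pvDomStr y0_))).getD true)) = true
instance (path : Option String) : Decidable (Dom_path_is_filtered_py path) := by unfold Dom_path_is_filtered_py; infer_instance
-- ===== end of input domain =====

-- B replaces A's 23 whole-needle substring searches by a single pass over the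
-- normalized path that tests each slash-bounded interior component against a
-- name set (objective: alternative single-pass algorithm; not measured faster).

-- ===== PORT A =====
def pvNeedles : List String :=
  ["/vendor/", "/composer/", "/node_modules/", "/tests/", "/test/", "/docs/",
   "/doc/", "/examples/", "/example/", "/demo/", "/demos/", "/samples/",
   "/sample/", "/benchmark/", "/benchmarks/", "/build/", "/dist/",
   "/coverage/", "/tmp/", "/cache/", "/logs/", "/log/", "/storage/"]

def path_is_filtered_py (path : Option String) : Bool :=
  match path with
  | none => false                                  -- 'if not path' (None)
  | some p =>
    if PySem.Str.len p = 0 then false              -- 'if not path' (empty string)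
    else
      let s := PySem.Str.lower (PySem.Str.replace p "\\" "/")
      pvNeedles.any (fun n => PySem.Str.isIn n s)  -- any(n in s for n in needles)

-- ===== PORT B =====
def pvFiltered : List (List Char) :=
  ["vendor".toList, "composer".toList, "node_modules".toList, "tests".toList,
   "test".toList, "docs".toList, "doc".toList, "examples".toList,
   "example".toList, "demo".toList, "demos".toList, "samples".toList,
   "sample".toList, "benchmark".toList, "benchmarks".toList, "build".toList,
   "dist".toList, "coverage".toList, "tmp".toList, "cache".toList,
   "logs".toList, "log".toList, "storage".toList]

-- the 'for c in s' loop of Source B, state = (cur, inside)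
def pvScanB : List Char → List Char → Bool → Bool
  | [], _, _ => false
  | c :: rest, cur, inside =>
    if c = '/' then
      if inside && pvFiltered.contains cur then true
      else pvScanB rest [] true
    else pvScanB rest (cur ++ [c]) inside

def path_is_filtered_py_alt (path : Option String) : Bool :=
  match path with
  | none => false
  | some p =>
    if PySem.Str.len p = 0 then false
    else
      let s := PySem.Str.lower (PySem.Str.replace p "\\" "/")
      pvScanB s.toList [] false

-- ===== PRECONDITION & SPEC =====
def Spec_path_is_filtered_py (path : Option String) (out : Bool) : Prop := out = path_is_filtered_py_alt path
instance (path : Option String) (out : Bool) : Decidable (Spec_path_is_filtered_py path out) := by unfold Spec_path_is_filtered_py; infer_instance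

-- ===== CLAIM (what is proved, stated in full; the proofs are below) =====
def Claim_equal_path_is_filtered_py : Prop := ∀ (path : Option String), Dom_path_is_filtered_py path → Spec_path_is_filtered_py path (path_is_filtered_py path)

-- ===== LEMMAS AND PROOFS =====

-- every filtered name is nonempty and slash-free
theorem pvFiltered_ok : ∀ w ∈ pvFiltered, ('/' : Char) ∉ w ∧ w ≠ [] := by decide

-- the needles of A are exactly the filtered names wrapped in slashes
theorem pvNeedles_eq :
    pvNeedles.map String.toList = pvFiltered.map (fun w => '/' :: w ++ ['/']) := by decide

-- a pattern starting with '/' cannot start inside a slash-free block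
theorem pv_infix_skip (t rest : List Char) :
    ∀ (cur : List Char), ('/' : Char) ∉ cur →
      (('/' :: t) <:+: cur ++ rest ↔ ('/' :: t) <:+: rest) := by
  intro cur
  induction cur with
  | nil => intro _; simp
  | cons c cs ih =>
    intro h
    have hc : c ≠ '/' := by intro hc; exact h (by simp [hc])
    have hcs : ('/' : Char) ∉ cs := fun hm => h (List.mem_cons_of_mem _ hm)
    rw [List.cons_append, List.infix_cons_iff]
    constructor
    · rintro (hp | hi)
      · rw [List.cons_prefix_cons] at hp
        exact absurd hp.1.symm hc
      · exact (ih hcs).mp hi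
    · intro hi
      exact Or.inr ((ih hcs).mpr hi)

-- slash-free w++['/'] is a prefix of slash-free cur++'/'::rest only when w = cur
theorem pv_prefix_match (rest : List Char) :
    ∀ (w cur : List Char), ('/' : Char) ∉ w → ('/' : Char) ∉ cur →
      ((w ++ ['/']) <+: cur ++ '/' :: rest ↔ w = cur) := by
  intro w
  induction w with
  | nil =>
    intro cur hw hcur
    cases cur with
    | nil => simp
    | cons d ds =>
      simp only [List.nil_append, List.cons_append, List.cons_prefix_cons]
      constructor
      · rintro ⟨h1, _⟩; exact absurd h1.symm (fun hd => hcur (by simp [hd]))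
      · intro h; exact absurd h (by simp)
  | cons a w' ih =>
    intro cur hw hcur
    have ha : a ≠ '/' := fun h => hw (by simp [h])
    have hw' : ('/' : Char) ∉ w' := fun h => hw (List.mem_cons_of_mem _ h)
    cases cur with
    | nil =>
      simp only [List.nil_append, List.cons_append, List.cons_prefix_cons]
      constructor
      · rintro ⟨h1, _⟩; exact absurd h1 ha
      · intro h; exact absurd h (by simp)
    | cons d ds =>
      have hds : ('/' : Char) ∉ ds := fun h => hcur (List.mem_cons_of_mem _ h)
      simp only [List.cons_append, List.cons_prefix_cons]
      rw [ih ds hw' hds]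
      constructor
      · rintro ⟨h1, h2⟩; rw [h1, h2]
      · intro h; injection h with h1 h2; exact ⟨h1, by rw [h2]⟩

-- the scan invariant: pvScanB cs cur inside decides whether some slash-bounded
-- filtered name occurs in (prefix-state ++ cs)
theorem pvScanB_iff (cs : List Char) :
    ∀ (cur : List Char) (inside : Bool), ('/' : Char) ∉ cur →
      (pvScanB cs cur inside = true ↔
        ∃ w ∈ pvFiltered,
          ('/' :: w ++ ['/']) <:+: ((if inside then '/' :: cur else cur) ++ cs)) := by
  induction cs with
  | nil =>
    intro cur inside hcur
    simp only [pvScanB, List.append_nil]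
    constructor
    · intro h; exact absurd h (by simp)
    · rintro ⟨w, hwF, hinf⟩
      exfalso
      have hw := (pvFiltered_ok w hwF).1
      have h2 : List.count '/' ('/' :: w ++ ['/']) = 2 := by
        simp [List.count_append, List.count_eq_zero_of_not_mem hw]
      have hcur0 : List.count '/' cur = 0 := List.count_eq_zero_of_not_mem hcur
      cases inside with
      | false =>
        simp only [Bool.false_eq_true, if_false] at hinf
        have hle := hinf.count_le '/'
        rw [h2, hcur0] at hle
        omega
      | true =>
        simp only [reduceIte] at hinf
        have hle := hinf.count_le '/'
        rw [h2] at hle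
        simp [hcur0] at hle
  | cons c rest ih =>
    intro cur inside hcur
    by_cases hc : c = '/'
    · subst hc
      have hunfold : pvScanB ('/' :: rest) cur inside
          = if inside && pvFiltered.contains cur then true else pvScanB rest [] true := by
        simp [pvScanB]
      rw [hunfold]
      by_cases hmem : (inside && pvFiltered.contains cur) = true
      · rw [if_pos hmem]
        obtain ⟨hi, hc2⟩ := Bool.and_eq_true_iff.mp hmem
        refine iff_of_true rfl ⟨cur, List.contains_iff_mem.mp hc2, ?_⟩
        rw [hi]
        simp only [reduceIte]
        exact ⟨[], rest, by simp⟩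
      · rw [if_neg hmem]
        have hguard : (inside && pvFiltered.contains cur) = false := by
          revert hmem; cases (inside && pvFiltered.contains cur) <;> simp
        rw [ih [] true (by simp)]
        simp only [reduceIte]
        constructor
        · rintro ⟨w, hwF, hinf⟩
          refine ⟨w, hwF, ?_⟩
          cases inside with
          | false =>
            simp only [Bool.false_eq_true, if_false]
            exact (pv_infix_skip _ _ cur hcur).mpr hinf
          | true =>
            simp only [reduceIte, List.cons_append]
            exact List.infix_cons_iff.mpr (Or.inr
              ((pv_infix_skip _ _ cur hcur).mpr hinf))
        · rintro ⟨w, hwF, hinf⟩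
          refine ⟨w, hwF, ?_⟩
          have hw := (pvFiltered_ok w hwF).1
          cases inside with
          | false =>
            simp only [Bool.false_eq_true, if_false] at hinf
            exact (pv_infix_skip _ _ cur hcur).mp hinf
          | true =>
            simp only [reduceIte, List.cons_append] at hinf
            rcases List.infix_cons_iff.mp hinf with hp | hi
            · -- an occurrence at position 0 would force w = cur, but cur ∉ pvFiltered
              rw [List.cons_prefix_cons] at hp
              have hwc := (pv_prefix_match rest w cur hw hcur).mp hp.2
              subst hwc
              have hc2 : pvFiltered.contains w = false := by
                simpa using hguard
              rw [List.contains_iff_mem.mpr hwF] at hc2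
              exact absurd hc2 (by simp)
            · exact (pv_infix_skip _ _ cur hcur).mp hi
    · have hunfold : pvScanB (c :: rest) cur inside
          = pvScanB rest (cur ++ [c]) inside := by
        simp [pvScanB, hc]
      rw [hunfold]
      have hcur' : ('/' : Char) ∉ cur ++ [c] := by
        intro h
        rcases List.mem_append.mp h with h | h
        · exact hcur h
        · have hcc : '/' = c := by simpa using h
          exact hc hcc.symm
      rw [ih (cur ++ [c]) inside hcur']
      cases inside <;> simp

-- A's any-over-needles equals the existential over wrapped filtered names
theorem pvA_iff (s : String) :
    (pvNeedles.any (fun n => PySem.Str.isIn n s) = true ↔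
      ∃ w ∈ pvFiltered, ('/' :: w ++ ['/']) <:+: s.toList) := by
  rw [List.any_eq_true]
  constructor
  · rintro ⟨n, hn, hin⟩
    have hmap : n.toList ∈ pvNeedles.map String.toList := List.mem_map_of_mem hn
    rw [pvNeedles_eq] at hmap
    rcases List.mem_map.mp hmap with ⟨w, hwF, hw⟩
    exact ⟨w, hwF, hw ▸ (PySem.Str.isIn_iff_infix n s).mp hin⟩
  · rintro ⟨w, hwF, hinf⟩
    have hmap : ('/' :: w ++ ['/']) ∈ pvFiltered.map (fun w => '/' :: w ++ ['/']) :=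
      List.mem_map_of_mem hwF
    rw [← pvNeedles_eq] at hmap
    rcases List.mem_map.mp hmap with ⟨n, hn, hw⟩
    exact ⟨n, hn, (PySem.Str.isIn_iff_infix n s).mpr (hw ▸ hinf)⟩

theorem pv_main (s : String) :
    pvNeedles.any (fun n => PySem.Str.isIn n s) = pvScanB s.toList [] false := by
  rw [Bool.eq_iff_iff, pvA_iff, pvScanB_iff s.toList [] false (by simp)]
  simp

-- ===== VERDICT (by name: the statement is the Claim_ definition above) =====
theorem path_is_filtered_py_spec : Claim_equal_path_is_filtered_py := by
  intro path _
  unfold Spec_path_is_filtered_py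
  cases path with
  | none => rfl
  | some p =>
    simp only [path_is_filtered_py, path_is_filtered_py_alt]
    by_cases h : PySem.Str.len p = 0
    · rw [if_pos h, if_pos h]
    · rw [if_neg h, if_neg h]
      exact pv_main _
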